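-- pv_equiv track=rewrite | github.com/lkzfox/lotofacil | v2/libs/helper.py | chaveSequenciaPulo
-- ===== SOURCE A (Python) =====
-- def chaveSequenciaPulo(numeros):
-- 	chave = ''
-- 	tamanho_sequencia = 0
-- 	for n in range(len(numeros) - 1):
-- 		diferenca = numeros[n+1] - numeros[n]
-- 		if (numeros[n] + 1 == numeros[n+1]):
-- 			tamanho_sequencia += 1
-- 		elif tamanho_sequencia > 1:
-- 			chave += 'S' + str(tamanho_sequencia+1) + 'P' + str(diferenca)
-- 			tamanho_sequencia = 0
-- 		else:
-- 			tamanho_sequencia = 0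
--
-- 	if tamanho_sequencia > 0:
-- 		chave += 'S' + str(tamanho_sequencia+1)
--
-- 	return chave
-- ===== SOURCE B (Python) =====
-- def chaveSequenciaPulo(numeros):
--     # Pass 1: decompose into maximal consecutive (+1) runs as (length, gap-to-next or None).
--     runs = []
--     if numeros:
--         length = 1
--         prev = numeros[0]
--         for y in numeros[1:]:
--             if y == prev + 1:
--                 length += 1
--             else:
--                 runs.append((length, y - prev))
--                 length = 1
--             prev = y
--         runs.append((length, None))
--     # Pass 2: render the key from the runs.
--     key = ''
--     for L, gap in runs:
--         if gap is None:
--             if L >= 2: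
--                 key += 'S' + str(L)
--         elif L >= 3:
--             key += 'S' + str(L) + 'P' + str(gap)
--     return key
-- ===== Notes on version B (the rewrite author's own statement) =====
-- stated objective: alternative
-- what changed: Replaced A's single index loop with mutable run-length state by a two-pass decomposition: first build the list of maximal consecutive runs as (length, gap-to-next) pairs, then render the key from that run list.
import Mathlib
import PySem

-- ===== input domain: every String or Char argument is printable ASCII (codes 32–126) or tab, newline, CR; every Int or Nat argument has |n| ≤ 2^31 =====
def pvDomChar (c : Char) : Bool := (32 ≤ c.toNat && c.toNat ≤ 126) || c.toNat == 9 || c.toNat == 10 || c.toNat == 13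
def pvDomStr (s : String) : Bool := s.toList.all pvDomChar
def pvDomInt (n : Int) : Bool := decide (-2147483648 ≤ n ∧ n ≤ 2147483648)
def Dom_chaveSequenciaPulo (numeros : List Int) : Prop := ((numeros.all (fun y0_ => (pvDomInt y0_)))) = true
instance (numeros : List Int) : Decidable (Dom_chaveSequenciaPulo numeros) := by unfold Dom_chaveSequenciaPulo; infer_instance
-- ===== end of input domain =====

-- B re-decomposes A's single stateful loop into two passes (runs of consecutive numbers, then rendering); objective: alternative/simpler decomposition, not faster.

-- ===== PORT A =====
def chaveSequenciaPulo (numeros : List Int) : String :=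
  let r := (PySem.List.pyRange 0 ((numeros.length : Int) - 1) 1).foldl
    (fun (st : String × Int) n =>
      let diferenca := PySem.List.pyGetD numeros (n + 1) 0 - PySem.List.pyGetD numeros n 0
      if PySem.List.pyGetD numeros n 0 + 1 = PySem.List.pyGetD numeros (n + 1) 0 then
        (st.1, st.2 + 1)
      else if st.2 > 1 then
        (st.1 ++ ("S" ++ PySem.Int.toStr (st.2 + 1) ++ "P" ++ PySem.Int.toStr diferenca), 0)
      else
        (st.1, 0)) ("", 0)
  if r.2 > 0 then r.1 ++ ("S" ++ PySem.Int.toStr (r.2 + 1)) else r.1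

-- ===== PORT B =====
-- pass 1 of Source B: maximal +1-runs as (length, gap-to-next), the last run carrying no gap
def pvRunsAux (len : Int) (prev : Int) : List Int → List (Int × Option Int)
  | [] => [(len, none)]
  | y :: ys => if y = prev + 1 then pvRunsAux (len + 1) y ys
               else (len, some (y - prev)) :: pvRunsAux 1 y ys

def pvRuns : List Int → List (Int × Option Int)
  | [] => []
  | x :: xs => pvRunsAux 1 x xs

-- pass 2 of Source B: what one run contributes to the key
def pvPart : Int × Option Int → String
  | (L, none) => if L ≥ 2 then "S" ++ PySem.Int.toStr L else ""
  | (L, some g) => if L ≥ 3 then "S" ++ PySem.Int.toStr L ++ "P" ++ PySem.Int.toStr g else ""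

def chaveSequenciaPulo_alt (numeros : List Int) : String :=
  (pvRuns numeros).foldl (fun key r => key ++ pvPart r) ""

-- ===== PRECONDITION & SPEC =====
def Spec_chaveSequenciaPulo (numeros : List Int) (out : String) : Prop := out = chaveSequenciaPulo_alt numeros
instance (numeros : List Int) (out : String) : Decidable (Spec_chaveSequenciaPulo numeros out) := by unfold Spec_chaveSequenciaPulo; infer_instance

-- ===== CLAIM (what is proved, stated in full; the proofs are below) =====
def Claim_equal_chaveSequenciaPulo : Prop := ∀ (numeros : List Int), Dom_chaveSequenciaPulo numeros → Spec_chaveSequenciaPulo numeros (chaveSequenciaPulo numeros)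

-- ===== LEMMAS AND PROOFS =====

-- A's loop body, on the two fetched elements
def stepA (st : String × Int) (a b : Int) : String × Int :=
  let diferenca := b - a
  if a + 1 = b then (st.1, st.2 + 1)
  else if st.2 > 1 then
    (st.1 ++ ("S" ++ PySem.Int.toStr (st.2 + 1) ++ "P" ++ PySem.Int.toStr diferenca), 0)
  else (st.1, 0)

-- A's epilogue
def finA (st : String × Int) : String :=
  if st.2 > 0 then st.1 ++ ("S" ++ PySem.Int.toStr (st.2 + 1)) else st.1

lemma pairs_map (xs : List Int) :
    (PySem.List.pyRange 0 ((xs.length : Int) - 1) 1).map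
      (fun n => (PySem.List.pyGetD xs n 0, PySem.List.pyGetD xs (n + 1) 0))
    = xs.zip xs.tail := by
  apply List.ext_getElem
  · simp only [List.length_map, PySem.List.length_pyRange_one, List.length_zip, List.length_tail]
    omega
  · intro k h1 h2
    have hlen : k < xs.length - 1 := by
      simp only [List.length_map, PySem.List.length_pyRange_one] at h1
      omega
    have hk : k < xs.length := by omega
    have hk1 : k + 1 < xs.length := by omega
    simp only [List.getElem_map, PySem.List.getElem_pyRange_one, zero_add, List.getElem_zip,
      List.getElem_tail]
    have g1 : PySem.List.pyGetD xs ((k : Int)) 0 = xs[k] := by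
      rw [PySem.List.pyGetD_natCast, List.getD_eq_getElem xs 0 hk]
    have g2 : PySem.List.pyGetD xs ((k : Int) + 1) 0 = xs[k + 1] := by
      have : ((k : Int) + 1) = ((k + 1 : Nat) : Int) := by push_cast; ring
      rw [this, PySem.List.pyGetD_natCast, List.getD_eq_getElem xs 0 hk1]
    rw [g1, g2]

lemma fold_idx (xs : List Int) (init : String × Int) :
    (PySem.List.pyRange 0 ((xs.length : Int) - 1) 1).foldl
      (fun st n => stepA st (PySem.List.pyGetD xs n 0) (PySem.List.pyGetD xs (n + 1) 0)) init
    = (xs.zip xs.tail).foldl (fun st p => stepA st p.1 p.2) init := by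
  rw [← pairs_map, List.foldl_map]

lemma runLemma (ys : List Int) : ∀ (prev t : Int) (c : String), 0 ≤ t →
    finA (((prev :: ys).zip ys).foldl (fun st p => stepA st p.1 p.2) (c, t))
    = (pvRunsAux (t + 1) prev ys).foldl (fun k r => k ++ pvPart r) c := by
  induction ys with
  | nil =>
    intro prev t c ht
    simp only [List.zip_nil_right, List.foldl_nil, pvRunsAux, List.foldl_cons, finA, pvPart]
    split_ifs with h1 h2 h2
    · rfl
    · omega
    · omega
    · simp
  | cons y ys ih =>
    intro prev t c ht
    rw [show ((prev :: y :: ys).zip (y :: ys)) = (prev, y) :: ((y :: ys).zip ys) from rfl,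
      List.foldl_cons, pvRunsAux]
    by_cases h : y = prev + 1
    · rw [if_pos h]
      have hs : stepA (c, t) prev y = (c, t + 1) := by
        simp only [stepA]; rw [if_pos h.symm]
      rw [hs]
      exact ih y (t + 1) c (by omega)
    · rw [if_neg h, List.foldl_cons]
      have hne : ¬ (prev + 1 = y) := fun hh => h hh.symm
      by_cases ht1 : t > 1
      · have hs : stepA (c, t) prev y =
            (c ++ ("S" ++ PySem.Int.toStr (t + 1) ++ "P" ++ PySem.Int.toStr (y - prev)), 0) := by
          simp only [stepA]; rw [if_neg hne, if_pos ht1]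
        have hp : pvPart (t + 1, some (y - prev)) =
            "S" ++ PySem.Int.toStr (t + 1) ++ "P" ++ PySem.Int.toStr (y - prev) := by
          simp only [pvPart]; rw [if_pos (by omega : (t + 1 : Int) ≥ 3)]
        rw [hs, hp]
        simpa using ih y 0 _ le_rfl
      · have hs : stepA (c, t) prev y = (c, 0) := by
          simp only [stepA]; rw [if_neg hne, if_neg ht1]
        have hp : pvPart (t + 1, some (y - prev)) = "" := by
          simp only [pvPart]; rw [if_neg (by omega : ¬ (t + 1 : Int) ≥ 3)]
        rw [hs, hp]
        have hc : c ++ "" = c := by simp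
        rw [hc]
        simpa using ih y 0 c le_rfl

-- ===== VERDICT (by name: the statement is the Claim_ definition above) =====
theorem chaveSequenciaPulo_spec : Claim_equal_chaveSequenciaPulo := by
  intro numeros _
  unfold Spec_chaveSequenciaPulo
  cases numeros with
  | nil => rfl
  | cons x rest =>
      show finA (((PySem.List.pyRange 0 (((x :: rest).length : Int) - 1) 1)).foldl
        (fun st n => stepA st (PySem.List.pyGetD (x :: rest) n 0) (PySem.List.pyGetD (x :: rest) (n + 1) 0)) ("", 0))
        = chaveSequenciaPulo_alt (x :: rest)
      rw [fold_idx]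
      have h := runLemma rest x 0 "" (by omega)
      simpa using h
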